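-- pv_equiv track=rewrite | github.com/ramogi4960/Leetcode-problems | hard/Minimum Replacements to Sort the Array.py | minimumReplacement
-- ===== SOURCE A (Python) =====
-- def minimumReplacement(nums: list[int]) -> int:
--     if nums == sorted(nums): return 0
--     count = 0
--     i = len(nums) - 1
--     while i > 0:
--         if nums[i] >= nums[i - 1]:
--             i -= 1
--         else:
--             temp = nums[i - 1]
--             # c = None
--             # for item in range(1, temp + 1):
--             #     if abs(item - (temp - item)) == 0:
--             #         c = 0
--             #         break
--             #     else:
--             #         if c == None:
--             #             c = abs(item - (temp - item))
--             #         else: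
--             #             if abs(item - (temp - item)) <= c:
--             #                 c = abs(item - (temp - item))
--             nums[i - 1] = nums[i]
--             nums.insert(i - 1, temp - nums[i])
--             count += 1
--
--     return count
-- ===== SOURCE B (Python) =====
-- def minimumReplacement(nums: list[int]) -> int:
--     # Single right-to-left pass: ceil-division closed form for the number of
--     # peel-splits performed per element; no list mutation.
--     if not nums:
--         return 0
--     count = 0
--     limit = nums[-1]
--     for x in reversed(nums[:-1]):
--         if x <= limit:
--             limit = x
--         else:
--             k = -(-x // limit)           # pieces = ceil(x / limit)
--             count += k - 1
--             limit = x - (k - 1) * limit  # leftover piece (peel remainder)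
--     return count
-- ===== Notes on version B (the rewrite author's own statement) =====
-- stated objective: alternative
-- what changed: Replaces A's while-loop that physically splits elements one peel at a time with list.insert (plus a full sorted() pre-check) by a single right-to-left pass that computes the number of peels per element in closed form with ceiling division, mutating nothing; intended as asymptotically cheaper (O(n) vs O(n + S*n) with S total splits), but a timing run could not measure a ratio because A timed out at n=16 where B returned.
import Mathlib
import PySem

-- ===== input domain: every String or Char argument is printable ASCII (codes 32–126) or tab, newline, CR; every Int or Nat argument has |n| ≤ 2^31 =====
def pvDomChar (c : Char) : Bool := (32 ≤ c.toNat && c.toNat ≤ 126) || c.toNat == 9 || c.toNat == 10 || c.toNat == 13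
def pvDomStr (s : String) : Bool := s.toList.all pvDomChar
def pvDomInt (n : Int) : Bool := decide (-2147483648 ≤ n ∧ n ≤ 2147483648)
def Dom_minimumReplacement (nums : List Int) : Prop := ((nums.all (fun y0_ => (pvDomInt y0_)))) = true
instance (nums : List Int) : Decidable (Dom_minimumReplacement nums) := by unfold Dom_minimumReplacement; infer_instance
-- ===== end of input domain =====

-- B replaces A's peel-by-peel list surgery with a single right-to-left pass using
-- ceiling division (alternative algorithm; A also mutates its argument in place —
-- the equivalence proved here is about the RETURN value only, B does not mutate).


-- ===== PORT A =====
-- A's while-loop.  The Python loop is not structurally terminating (the list grows on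
-- every insert, and on bad inputs it really diverges), so it is ported with a fuel
-- guard; Pre_ below admits exactly the inputs on which the Python loop terminates,
-- and there the fuel pvFuel is proved sufficient.  Python's i is a nonnegative int
-- throughout (loop guard i > 0), so Nat indexing / set / insertIdx are exact here.
def loopA (fuel : Nat) (l : List Int) (i : Nat) (count : Int) : Int :=
  match fuel with
  | 0 => count
  | fuel + 1 =>
    if 0 < i then
      match l[i]?, l[i-1]? with
      | some xi, some xim =>
        if xim ≤ xi then
          loopA fuel l (i - 1) count                                        -- nums[i] >= nums[i-1]: i -= 1
        else
          loopA fuel ((l.set (i-1) xi).insertIdx (i-1) (xim - xi)) i (count + 1)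
            -- temp = nums[i-1]; nums[i-1] = nums[i]; nums.insert(i-1, temp - nums[i]); count += 1
      | _, _ => count                                                        -- unreachable (indices in range)
    else count

def pvFuel (nums : List Int) : Nat := nums.foldl (fun s x => s + (x.natAbs + 1)) 1

def minimumReplacement (nums : List Int) : Int :=
  if nums = PySem.List.sorted nums (fun x => x) false then 0
  else loopA (pvFuel nums) nums (nums.length - 1) 0

-- ===== PORT B =====
def stepB (st : Int × Int) (x : Int) : Int × Int :=
  if x ≤ st.1 then (x, st.2)
  else
    let k := -(PySem.Int.floordiv (-x) st.1)    -- k = -(-x // limit) = ceil(x / limit)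
    (x - (k - 1) * st.1, st.2 + (k - 1))

def minimumReplacement_alt (nums : List Int) : Int :=
  match nums.reverse with
  | [] => 0
  | last :: rest => (rest.foldl stepB (last, 0)).2   -- for x in reversed(nums[:-1])

-- ===== PRECONDITION & SPEC =====
-- Pre_ excludes exactly the inputs on which the Python A DIVERGES (never returns):
-- lists with a descent onto a nonpositive value (e.g. [3, 0]), where A's peel loop
-- repeats forever.  At every descent the lower value must be positive.
def Pre_minimumReplacement (nums : List Int) : Prop :=
  List.IsChain (fun u v : Int => v < u → 0 < v) nums
instance (nums : List Int) : Decidable (Pre_minimumReplacement nums) := by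
  unfold Pre_minimumReplacement; infer_instance

def pvWitness_minimumReplacement : List Int := [3, 10, 4]

def Spec_minimumReplacement (nums : List Int) (out : Int) : Prop := out = minimumReplacement_alt nums
instance (nums : List Int) (out : Int) : Decidable (Spec_minimumReplacement nums out) := by unfold Spec_minimumReplacement; infer_instance

-- ===== CLAIM (what is proved, stated in full; the proofs are below) =====
def Claim_equal_minimumReplacement : Prop := ∀ (nums : List Int), Dom_minimumReplacement nums → Pre_minimumReplacement nums → Spec_minimumReplacement nums (minimumReplacement nums)

-- ===== LEMMAS AND PROOFS =====

theorem loopA_zero (fuel : Nat) (l : List Int) (count : Int) : loopA fuel l 0 count = count := by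
  cases fuel <;> simp [loopA]

-- foldl of an additive accumulator, written out
theorem foldl_add_natAbs (l : List Int) (init : Nat) :
    l.foldl (fun s x => s + (x.natAbs + 1)) init = init + (l.map (fun x => x.natAbs + 1)).sum := by
  induction l generalizing init with
  | nil => simp
  | cons a l ih => simp [List.foldl_cons, ih]; omega

-- fuel needed to process element a after the (reversed) prefix rpre
def pvF (rpre : List Int) (a : Int) : Nat := a.natAbs + 1 + (rpre.map (fun x => x.natAbs + 1)).sum

theorem set_append_length (l₁ : List Int) (x v : Int) (l₂ : List Int) :
    (l₁ ++ x :: l₂).set l₁.length v = l₁ ++ v :: l₂ := by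
  induction l₁ with
  | nil => simp
  | cons a l ih => simp [ih]

theorem insertIdx_append_length (l₁ : List Int) (v : Int) (l₂ : List Int) :
    (l₁ ++ l₂).insertIdx l₁.length v = l₁ ++ v :: l₂ := by
  induction l₁ with
  | nil => simp
  | cons a l ih => simpa [List.insertIdx_succ_cons] using ih

theorem getElem?_append_len (l₁ : List Int) (x : Int) (l₂ : List Int) :
    (l₁ ++ x :: l₂)[l₁.length]? = some x := by
  rw [List.getElem?_append_right (by omega)]
  simp

theorem getElem?_append_len_succ (l₁ : List Int) (x y : Int) (l₂ : List Int) :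
    (l₁ ++ x :: y :: l₂)[l₁.length + 1]? = some y := by
  rw [List.getElem?_append_right (by omega)]
  simp

-- one peel step equals incrementing the count and reducing x by limit, in B's closed form
theorem stepB_peel (limit count x : Int) (hl : 0 < limit) (hx : limit < x) :
    stepB (limit, count) x = stepB (limit, count + 1) (x - limit) := by
  have hdiv : PySem.Int.floordiv (-(x - limit)) limit = PySem.Int.floordiv (-x) limit + 1 := by
    rw [PySem.Int.floordiv_eq_ediv_of_pos hl, PySem.Int.floordiv_eq_ediv_of_pos hl]
    have : -(x - limit) = -x + 1 * limit := by ring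
    rw [this, Int.add_mul_ediv_right _ _ (by omega)]
  by_cases hle : x - limit ≤ limit
  · -- exactly one peel remains: k = 2
    have hk : -(PySem.Int.floordiv (-x) limit) = 2 :=
      (PySem.Int.neg_floordiv_neg_eq_iff_of_pos hl).mpr (by constructor <;> omega)
    simp only [stepB, hle, if_true, if_neg (by omega : ¬ x ≤ limit)]
    simp only [hk, Prod.mk.injEq]
    constructor <;> ring_nf
  · have hx2 : limit < x - limit := by omega
    have hk' : -(PySem.Int.floordiv (-(x - limit)) limit) = -(PySem.Int.floordiv (-x) limit) - 1 := by
      rw [hdiv]; ring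
    simp only [stepB, if_neg (by omega : ¬ x ≤ limit), if_neg (by omega : ¬ x - limit ≤ limit)]
    simp only [hk', Prod.mk.injEq]
    constructor <;> ring

-- the relation that holds along the REVERSED list on admitted inputs
def pvS (u v : Int) : Prop := u < v → 0 < u

-- Main loop invariant: A's loop at position |rpre|+1 over rpre.reverse ++ a :: limit :: t
-- computes exactly B's fold of stepB over a :: rpre started at (limit, count).
theorem loopA_eq : ∀ (fuel : Nat) (rpre : List Int) (a limit : Int) (t : List Int) (count : Int),
    List.IsChain pvS (limit :: a :: rpre) →
    pvF rpre a ≤ fuel →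
    loopA fuel (rpre.reverse ++ a :: limit :: t) (rpre.length + 1) count
      = (List.foldl stepB (stepB (limit, count) a) rpre).2 := by
  intro fuel
  induction fuel with
  | zero =>
    intro rpre a limit t count _ hfuel
    exfalso; unfold pvF at hfuel; omega
  | succ fuel ih =>
    intro rpre a limit t count hchain hfuel
    have hget1 : (rpre.reverse ++ a :: limit :: t)[rpre.length + 1]? = some limit := by
      have := getElem?_append_len_succ rpre.reverse a limit t
      simpa using this
    have hget0 : (rpre.reverse ++ a :: limit :: t)[rpre.length]? = some a := by
      have := getElem?_append_len rpre.reverse a (limit :: t)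
      simpa using this
    rw [loopA]
    simp only [if_pos (by omega : 0 < rpre.length + 1), Nat.add_sub_cancel, hget1, hget0]
    by_cases hle : a ≤ limit
    · rw [if_pos hle]
      have hstep : stepB (limit, count) a = (a, count) := by simp [stepB, hle]
      rw [hstep]
      cases rpre with
      | nil => simp [loopA_zero]
      | cons a' rpre' =>
        have hlist : (a' :: rpre').reverse ++ a :: limit :: t
            = rpre'.reverse ++ a' :: a :: (limit :: t) := by simp
        have hlen : (a' :: rpre').length = rpre'.length + 1 := rfl
        rw [hlist, hlen]
        rw [ih rpre' a' a (limit :: t) count]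
        · simp
        · -- chain: drop the head pair (limit, a)
          exact hchain.tail
        · unfold pvF at hfuel ⊢; simp at hfuel ⊢; omega
    · rw [if_neg hle]
      have hl : 0 < limit := by
        have := (List.isChain_cons_cons.mp hchain).1
        exact this (by omega)
      have hset : ((rpre.reverse ++ a :: limit :: t).set rpre.length limit) =
          rpre.reverse ++ limit :: limit :: t := by
        have := set_append_length rpre.reverse a limit (limit :: t)
        simpa using this
      have hins : ((rpre.reverse ++ limit :: limit :: t).insertIdx rpre.length (a - limit)) =
          rpre.reverse ++ (a - limit) :: limit :: limit :: t := by
        have := insertIdx_append_length rpre.reverse (a - limit) (limit :: limit :: t)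
        simpa using this
    -- rewrite the mutated list and recurse on the smaller leftover a - limit
      rw [hset, hins]
      rw [ih rpre (a - limit) limit (limit :: t) (count + 1)]
      · rw [stepB_peel limit count a hl (by omega)]
      · -- chain for the new head pair (limit, a - limit) and (a - limit, head rpre)
        have htail : List.IsChain pvS (a :: rpre) := hchain.tail
        have htail2 : List.IsChain pvS rpre := htail.tail
        cases rpre with
        | nil => exact List.isChain_cons_cons.mpr ⟨fun _ => hl, by simp⟩
        | cons b rpre' =>
          exact List.isChain_cons_cons.mpr ⟨fun _ => hl,
            List.isChain_cons_cons.mpr ⟨fun _ => by omega, htail2⟩⟩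
      · unfold pvF at hfuel ⊢
        have : (a - limit).natAbs < a.natAbs := by omega
        omega

-- on a non-increasing reversed list the fold never splits: the count is unchanged
theorem foldl_stepB_sorted : ∀ (rpre : List Int) (limit count : Int),
    List.IsChain (fun u v : Int => v ≤ u) (limit :: rpre) →
    (rpre.foldl stepB (limit, count)).2 = count := by
  intro rpre
  induction rpre with
  | nil => intro limit count _; rfl
  | cons a rpre' ih =>
    intro limit count hchain
    have ha : a ≤ limit := (List.isChain_cons_cons.mp hchain).1
    have hstep : stepB (limit, count) a = (a, count) := by simp [stepB, ha]
    simp only [List.foldl_cons, hstep]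
    exact ih a count hchain.tail

-- ===== VERDICT (by name: the statement is the Claim_ definition above) =====
theorem minimumReplacement_spec : Claim_equal_minimumReplacement := by
  intro nums _ hpre
  unfold Spec_minimumReplacement
  unfold minimumReplacement
  split_ifs with hs
  · -- nums == sorted(nums): A returns 0; B's fold keeps the count at 0
    have hch : List.IsChain (fun a b : Int => a ≤ b) nums := by
      have hpw := PySem.List.sorted_pairwise nums (fun x => x)
      rw [← hs] at hpw
      exact hpw.isChain
    have hrev : List.IsChain (fun u v : Int => v ≤ u) nums.reverse := by
      rw [List.isChain_reverse]
      exact hch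
    unfold minimumReplacement_alt
    cases h : nums.reverse with
    | nil => rfl
    | cons last rest =>
      rw [h] at hrev
      exact (foldl_stepB_sorted rest last 0 hrev).symm
  · have hrevchain : List.IsChain pvS nums.reverse := by
      rw [List.isChain_reverse]
      exact List.IsChain.imp (fun u v h => h) hpre
    unfold minimumReplacement_alt
    cases h : nums.reverse with
    | nil =>
      have : nums = [] := by simpa using congrArg List.reverse h
      subst this
      simp [loopA_zero]
    | cons limit rest =>
      cases rest with
      | nil =>
        have : nums = [limit] := by
          have := congrArg List.reverse h
          simpa using this
        subst this
        simp [loopA_zero]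
      | cons a rpre =>
        have hnums : nums = rpre.reverse ++ a :: limit :: [] := by
          have := congrArg List.reverse h
          simpa using this
        subst hnums
        have hchain : List.IsChain pvS (limit :: a :: rpre) := by
          rw [h] at hrevchain; exact hrevchain
        have hfuel : pvF rpre a ≤ pvFuel (rpre.reverse ++ a :: limit :: []) := by
          unfold pvFuel pvF
          rw [foldl_add_natAbs]
          simp [List.sum_append]
          omega
        show loopA (pvFuel (rpre.reverse ++ a :: limit :: []))
              (rpre.reverse ++ a :: limit :: [])
              ((rpre.reverse ++ a :: limit :: []).length - 1) 0
            = (List.foldl stepB (stepB (limit, 0) a) rpre).2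
        rw [show (rpre.reverse ++ a :: limit :: []).length - 1 = rpre.length + 1 by simp]
        exact loopA_eq _ rpre a limit [] 0 hchain hfuel
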